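-- pv_equiv track=rewrite | github.com/Quantum-Ducks/QuBayes | qbayes_tools.py | generate_cond_keys
-- ===== SOURCE A (Python) =====
-- from itertools import product
--
-- def generate_cond_keys(s_0, s_i):
--     ##############################################
--     #THIS FUNCTION WILL GENERATE A LIST OF STRINGS TO USE AS KEYS FOR CONDITIONAL PROBABILITIES
--     ### INPUT ###
--     # s_0    int    number of states of the child node
--     # s_i    list   number of states for each parent node, from most to least significant
--
--     ### OUTPUT ###
--     # list of strings to use as keys for conditional probabilities (included commas in case there is ever an >11-state node!)
--     ##############################################
--
--     ranges = [range(0, elem) for elem in list([s_0])+list(s_i)]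
--     enumed = product(*ranges)
--
--     cond_keys = []
--     for enum in enumed:
--         enum = list(enum)
--         parent_str = ",".join(str(x) for x in enum[1:])
--         cond_keys.append("%s|%s"%(str(enum[0]), parent_str))
--
--     return cond_keys
-- ===== SOURCE B (Python) =====
-- def generate_cond_keys(s_0, s_i):
--     # No combinations at all if any dimension is empty.
--     if s_0 <= 0 or any(s <= 0 for s in s_i):
--         return []
--     # Build the parent key strings directly (no itertools.product, no tuples):
--     # start with the first parent's states, then extend one dimension at a time.
--     if s_i:
--         parents = [str(v) for v in range(s_i[0])]
--         for s in s_i[1:]: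
--             parents = [p + "," + str(v) for p in parents for v in range(s)]
--     else:
--         parents = [""]
--     return ["%s|%s" % (c, p) for c in range(s_0) for p in parents]
-- ===== Notes on version B (the rewrite author's own statement) =====
-- stated objective: simpler
-- what changed: Replaces itertools.product over ranges (tuples that are then formatted per element) with an incremental build of the parent key strings themselves, one dimension at a time, prefixing each child state at the end; no tuples or product call.
import Mathlib
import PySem

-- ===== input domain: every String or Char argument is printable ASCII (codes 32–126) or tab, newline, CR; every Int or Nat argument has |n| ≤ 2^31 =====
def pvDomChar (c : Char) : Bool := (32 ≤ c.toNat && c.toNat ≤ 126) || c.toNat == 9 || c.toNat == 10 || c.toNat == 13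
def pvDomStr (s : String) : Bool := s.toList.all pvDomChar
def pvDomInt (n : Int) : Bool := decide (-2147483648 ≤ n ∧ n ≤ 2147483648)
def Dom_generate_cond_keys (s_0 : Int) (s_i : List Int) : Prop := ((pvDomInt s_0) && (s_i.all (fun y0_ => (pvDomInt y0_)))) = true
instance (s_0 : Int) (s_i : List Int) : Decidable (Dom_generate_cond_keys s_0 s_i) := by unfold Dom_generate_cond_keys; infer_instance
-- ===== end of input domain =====

-- B builds the key strings directly, extending parent strings one dimension at a
-- time, instead of materialising tuples with itertools.product; objective: simpler.

-- ===== PORT A =====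
-- itertools.product over a list of iterables (first iterable outermost)
def pvProduct : List (List Int) → List (List Int)
  | [] => [[]]
  | r :: rs => r.flatMap (fun x => (pvProduct rs).map (fun t => x :: t))

def generate_cond_keys (s_0 : Int) (s_i : List Int) : List String :=
  let ranges := (([s_0] ++ s_i).map (fun elem => PySem.List.pyRange 0 elem 1))
  let enumed := pvProduct ranges
  enumed.foldl (fun cond_keys enum =>
    let parent_str := PySem.Str.join "," ((PySem.List.slice enum (some 1) none).map PySem.Int.toStr)
    cond_keys ++ [PySem.Int.toStr (PySem.List.pyGetD enum 0 0) ++ "|" ++ parent_str]) []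

-- ===== PORT B =====
def pvExtend (ps : List String) (s : Int) : List String :=
  ps.flatMap (fun p => (PySem.List.pyRange 0 s 1).map (fun v => p ++ "," ++ PySem.Int.toStr v))

def pvCore (s_0 : Int) (s_i : List Int) : List String :=
  let parents :=
    match s_i with
    | [] => [""]
    | s :: rest => rest.foldl pvExtend ((PySem.List.pyRange 0 s 1).map (fun v => PySem.Int.toStr v))
  (PySem.List.pyRange 0 s_0 1).flatMap (fun c => parents.map (fun p => PySem.Int.toStr c ++ "|" ++ p))

def generate_cond_keys_alt (s_0 : Int) (s_i : List Int) : List String :=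
  if (decide (s_0 ≤ 0) || s_i.any (fun s => decide (s ≤ 0))) = true then []
  else pvCore s_0 s_i

-- ===== PRECONDITION & SPEC =====
def Spec_generate_cond_keys (s_0 : Int) (s_i : List Int) (out : List String) : Prop := out = generate_cond_keys_alt s_0 s_i
instance (s_0 : Int) (s_i : List Int) (out : List String) : Decidable (Spec_generate_cond_keys s_0 s_i out) := by unfold Spec_generate_cond_keys; infer_instance

-- ===== CLAIM (what is proved, stated in full; the proofs are below) =====
def Claim_equal_generate_cond_keys : Prop := ∀ (s_0 : Int) (s_i : List Int), Dom_generate_cond_keys s_0 s_i → Spec_generate_cond_keys s_0 s_i (generate_cond_keys s_0 s_i)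

-- ===== LEMMAS AND PROOFS =====

-- incremental comma-append of one value, B's inner string step
def pvApp (p : String) (v : Int) : String := p ++ "," ++ PySem.Int.toStr v

theorem pvProduct_cons (r : List Int) (rs : List (List Int)) :
    pvProduct (r :: rs) = r.flatMap (fun x => (pvProduct rs).map (fun t => x :: t)) := rfl

-- A's append-loop is a map
theorem foldl_append_map {α β : Type} (f : α → β) :
    ∀ (l : List α) (acc : List β), l.foldl (fun a e => a ++ [f e]) acc = acc ++ l.map f := by
  intro l
  induction l with
  | nil => simp
  | cons x t ih => intro acc; simp [List.foldl, ih]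

-- join "," glues an already-joined head with the next piece
theorem join_glue (a b : String) (l : List String) :
    PySem.Str.join "," ((a ++ "," ++ b) :: l) = PySem.Str.join "," (a :: b :: l) := by
  cases l with
  | nil => simp [PySem.Str.join, PySem.Chars.join, List.intercalate]
  | cons c t => simp [PySem.Str.join, PySem.Chars.join, List.intercalate,
      List.intersperse, String.toList_append]

-- folding pvApp from p computes the comma-join with p in front
theorem foldl_pvApp_join : ∀ (e : List Int) (p : String),
    e.foldl pvApp p = PySem.Str.join "," (p :: e.map PySem.Int.toStr) := by
  intro e
  induction e with
  | nil => intro p; simp [PySem.Str.join, PySem.Chars.join, List.intercalate]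
  | cons v t ih =>
      intro p
      simp only [List.foldl, List.map]
      rw [ih (pvApp p v)]
      exact join_glue p (PySem.Int.toStr v) (t.map PySem.Int.toStr)

-- B's fold over remaining dimensions = join of the product of those dimensions
theorem foldl_pvExtend (rest : List Int) :
    ∀ (ps : List String),
    rest.foldl pvExtend ps =
      ps.flatMap (fun p => (pvProduct (rest.map (fun e => PySem.List.pyRange 0 e 1))).map
        (fun e => e.foldl pvApp p)) := by
  induction rest with
  | nil => intro ps; simp [pvProduct]
  | cons s t ih =>
      intro ps
      simp only [List.foldl]
      rw [ih (pvExtend ps s)]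
      simp only [pvExtend, List.flatMap_assoc]
      congr 1
      funext p
      simp [pvProduct_cons, List.map_flatMap, List.flatMap_map, List.map_map, Function.comp_def,
        List.foldl, pvApp]

-- the parents list B builds, as a join over the product of the parent ranges
theorem parents_eq (s_i : List Int) :
    (match s_i with
      | [] => [""]
      | s :: rest => rest.foldl pvExtend ((PySem.List.pyRange 0 s 1).map (fun v => PySem.Int.toStr v))) =
    (pvProduct (s_i.map (fun e => PySem.List.pyRange 0 e 1))).map
      (fun e => PySem.Str.join "," (e.map PySem.Int.toStr)) := by
  cases s_i with
  | nil => simp [pvProduct, PySem.Str.join, PySem.Chars.join, List.intercalate]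
  | cons s rest =>
      simp only []
      rw [foldl_pvExtend]
      simp only [List.map_cons, pvProduct_cons]
      simp [List.flatMap_map, List.map_flatMap, List.map_map, Function.comp_def, foldl_pvApp_join]

-- pvProduct is empty as soon as one factor is empty
theorem pvProduct_of_mem_nil : ∀ (rs : List (List Int)), [] ∈ rs → pvProduct rs = [] := by
  intro rs
  induction rs with
  | nil => intro h; cases h
  | cons r t ih =>
      intro h
      rw [pvProduct_cons]
      rcases List.mem_cons.mp h with h1 | h2
      · subst h1; simp
      · rw [ih h2]; simp

-- A always equals B's unguarded core
theorem A_eq_core (s_0 : Int) (s_i : List Int) : generate_cond_keys s_0 s_i = pvCore s_0 s_i := by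
  unfold generate_cond_keys pvCore
  rw [foldl_append_map, parents_eq]
  simp only [List.singleton_append, List.map_cons, List.nil_append, pvProduct_cons]
  simp [List.map_flatMap, List.map_map, Function.comp_def, PySem.List.slice_from_one,
    PySem.List.pyGetD, PySem.List.pyGet?, PySem.List.pyIdx?]

-- ===== VERDICT (by name: the statement is the Claim_ definition above) =====
theorem generate_cond_keys_spec : Claim_equal_generate_cond_keys := by
  intro s_0 s_i _
  unfold Spec_generate_cond_keys generate_cond_keys_alt
  by_cases h : (decide (s_0 ≤ 0) || s_i.any (fun s => decide (s ≤ 0))) = true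
  · rw [if_pos h]
    rw [A_eq_core]
    unfold pvCore
    rw [parents_eq]
    rcases Bool.or_eq_true_iff.mp h with h0 | hs
    · rw [PySem.List.pyRange_one_eq_nil (by simpa using of_decide_eq_true h0)]
      simp
    · rcases List.any_eq_true.mp hs with ⟨s, hmem, hle⟩
      rw [pvProduct_of_mem_nil]
      · simp
      · exact List.mem_map.mpr ⟨s, hmem, PySem.List.pyRange_one_eq_nil
          (by simpa using of_decide_eq_true hle)⟩
  · rw [if_neg h]
    exact A_eq_core s_0 s_i
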